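-- pv_equiv track=rewrite | github.com/fmamanifdeveloper/SIAM_CONTROL | src/utils/mensajes.py | obtener_codigo_personalizado
-- ===== SOURCE A (Python) =====
-- def obtener_codigo_personalizado(row, columns):
--     col_apellidos = next((c for c in columns if 'apellidos' in c.lower()), None)
--     col_dni = next((c for c in columns if 'dni' in c.lower()), None)
--     apellido = row[columns.index(col_apellidos)] if col_apellidos else ''
--     dni = str(row[columns.index(col_dni)]) if col_dni else ''
--     primer_apellido = apellido.split()[0] if apellido else ''
--     ultimos4_dni = dni[-4:] if len(dni) >= 4 else dni
--     return f"{primer_apellido}{ultimos4_dni}"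
-- ===== SOURCE B (Python) =====
-- def obtener_codigo_personalizado(row, columns):
--     apellido = ''
--     dni = ''
--     for c, v in reversed(list(zip(columns, row))):
--         cl = c.lower()
--         if 'apellidos' in cl:
--             apellido = v
--         if 'dni' in cl:
--             dni = str(v)
--     primer_apellido = apellido.split()[0] if apellido else ''
--     return f"{primer_apellido}{dni[-4:]}"
-- ===== Notes on version B (the rewrite author's own statement) =====
-- stated objective: simpler
-- what changed: Instead of A's index-based pipeline (two next() scans over columns plus two columns.index scans, then row[...] indexing), B makes one reversed pass over zip(columns, row) that overwrites apellido/dni on every match so the leftmost match wins, carrying the cell values directly with no indices or flags, and drops the redundant len>=4 guard since dni[-4:] already returns dni when shorter.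
-- outside the precondition, e.g. on obtener_codigo_personalizado([], ['dni']): A raises IndexError, B returns ''; on obtener_codigo_personalizado([' '], ['apellidos']): A raises IndexError, B raises IndexError
import Mathlib
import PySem

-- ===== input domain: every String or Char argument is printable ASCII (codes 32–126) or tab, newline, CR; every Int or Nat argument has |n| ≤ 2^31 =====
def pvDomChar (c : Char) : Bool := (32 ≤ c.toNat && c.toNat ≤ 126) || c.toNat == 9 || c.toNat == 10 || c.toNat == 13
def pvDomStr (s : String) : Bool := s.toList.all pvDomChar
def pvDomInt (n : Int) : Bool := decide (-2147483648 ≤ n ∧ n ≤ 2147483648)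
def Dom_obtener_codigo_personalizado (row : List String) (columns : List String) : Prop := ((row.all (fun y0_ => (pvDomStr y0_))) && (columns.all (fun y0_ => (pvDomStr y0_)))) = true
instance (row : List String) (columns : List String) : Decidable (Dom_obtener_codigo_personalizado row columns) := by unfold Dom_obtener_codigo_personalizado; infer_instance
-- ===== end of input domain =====

-- B replaces A's index-based lookup (two next() scans over columns plus two columns.index scans,
-- then row[...] indexing) by a single reversed pass over zip(columns, row) that overwrites the two
-- values on every match, so the leftmost match wins with no indices or flags; objective: simpler.

-- ===== PORT A =====
def obtener_codigo_personalizado (row : List String) (columns : List String) : String :=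
  -- col_apellidos = next((c for c in columns if 'apellidos' in c.lower()), None)
  let col_apellidos := columns.find? (fun c => PySem.Str.isIn "apellidos" (PySem.Str.lower c))
  -- col_dni = next((c for c in columns if 'dni' in c.lower()), None)
  let col_dni := columns.find? (fun c => PySem.Str.isIn "dni" (PySem.Str.lower c))
  -- apellido = row[columns.index(col_apellidos)] if col_apellidos else ''
  -- (row indexing defaulted; Pre_ excludes the out-of-range IndexError; columns.index cannot fail here)
  let apellido := match col_apellidos with
    | none => ""
    | some c => if c = "" then "" else
        match PySem.List.index? columns c with
        | some i => PySem.List.pyGetD row (i : Int) ""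
        | none => ""
  -- dni = str(row[columns.index(col_dni)]) if col_dni else ''   (str() is the identity on str)
  let dni := match col_dni with
    | none => ""
    | some c => if c = "" then "" else
        match PySem.List.index? columns c with
        | some i => PySem.List.pyGetD row (i : Int) ""
        | none => ""
  -- primer_apellido = apellido.split()[0] if apellido else ''  (default excluded by Pre_)
  let primer_apellido := if apellido = "" then "" else PySem.List.pyGetD (PySem.Str.split₀ apellido) 0 ""
  -- ultimos4_dni = dni[-4:] if len(dni) >= 4 else dni
  let ultimos4_dni := if 4 ≤ PySem.Str.len dni then PySem.Str.slice dni (some (-4)) none else dni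
  primer_apellido ++ ultimos4_dni

-- ===== PORT B =====
def obtener_codigo_personalizado_alt (row : List String) (columns : List String) : String :=
  -- for c, v in reversed(list(zip(columns, row))): overwrite on every match (leftmost match wins last)
  let st := ((columns.zip row).reverse).foldl
    (fun (st : String × String) cv =>
      let cl := PySem.Str.lower cv.1
      ((if PySem.Str.isIn "apellidos" cl then cv.2 else st.1),
       (if PySem.Str.isIn "dni" cl then cv.2 else st.2)))
    ("", "")
  let apellido := st.1
  let dni := st.2
  -- primer_apellido = apellido.split()[0] if apellido else ''
  let primer_apellido := if apellido = "" then "" else PySem.List.pyGetD (PySem.Str.split₀ apellido) 0 ""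
  -- f"{primer_apellido}{dni[-4:]}"
  primer_apellido ++ PySem.Str.slice dni (some (-4)) none

-- ===== PRECONDITION & SPEC =====
-- 'apellidos' in c.lower()  /  'dni' in c.lower()  (used only to state Pre_)
def pvHasAp (c : String) : Bool := PySem.Str.isIn "apellidos" (PySem.Str.lower c)
def pvHasDni (c : String) : Bool := PySem.Str.isIn "dni" (PySem.Str.lower c)

-- Pre_ excludes exactly the inputs where A raises IndexError: the first matching column index is
-- out of range for row, or the selected apellido cell is nonempty whitespace (split()[0] on []).
def Pre_obtener_codigo_personalizado (row : List String) (columns : List String) : Prop :=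
  (((columns.findIdx? pvHasAp).all (fun k =>
        decide (k < row.length) &&
        (decide (row.getD k "" = "") || !(PySem.Str.split₀ (row.getD k "")).isEmpty))) &&
   ((columns.findIdx? pvHasDni).all (fun k => decide (k < row.length)))) = true
instance (row : List String) (columns : List String) : Decidable (Pre_obtener_codigo_personalizado row columns) := by unfold Pre_obtener_codigo_personalizado; infer_instance

def pvWitness_obtener_codigo_personalizado : List String × List String :=
  (["Garcia Lopez", "12345678Z"], ["Apellidos", "DNI"])

def Spec_obtener_codigo_personalizado (row : List String) (columns : List String) (out : String) : Prop := out = obtener_codigo_personalizado_alt row columns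
instance (row : List String) (columns : List String) (out : String) : Decidable (Spec_obtener_codigo_personalizado row columns out) := by unfold Spec_obtener_codigo_personalizado; infer_instance

-- ===== CLAIM (what is proved, stated in full; the proofs are below) =====
def Claim_equal_obtener_codigo_personalizado : Prop := ∀ (row : List String) (columns : List String), Dom_obtener_codigo_personalizado row columns → Pre_obtener_codigo_personalizado row columns → Spec_obtener_codigo_personalizado row columns (obtener_codigo_personalizado row columns)

-- ===== LEMMAS AND PROOFS =====

-- B's reversed-fold overwrite computes the value at the FIRST (leftmost) match
theorem pv_rev_fold (p : String × String → Bool) (l : List (String × String)) (e : String) :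
    l.reverse.foldl (fun (a : String) cv => if p cv then cv.2 else a) e
    = (match l.find? p with | some cv => cv.2 | none => e) := by
  rw [List.foldl_reverse]
  induction l with
  | nil => rfl
  | cons x xs ih =>
    by_cases hp : p x = true
    · simp [List.foldr_cons, hp]
    · simp [List.foldr_cons, hp, ih]

-- the leftmost match in columns, projected through zip with row
theorem pv_zip_find (p : String → Bool) :
    ∀ (cols row : List String) (k : Nat), cols.findIdx? p = some k → k < row.length →
    (cols.zip row).find? (fun cv => p cv.1) = some (cols.getD k "", row.getD k "") := by
  intro cols
  induction cols with
  | nil => intro row k h; simp at h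
  | cons c cs ih =>
    intro row k h hk
    cases row with
    | nil => simp at hk
    | cons v vs =>
      by_cases hp : p c = true
      · rw [List.findIdx?_cons] at h
        simp [hp] at h
        subst h
        simp [List.zip_cons_cons, hp]
      · rw [List.findIdx?_cons] at h
        simp [hp] at h
        obtain ⟨k', hk', rfl⟩ := h
        have : k' < vs.length := by simp at hk; omega
        simp [List.zip_cons_cons, hp, ih vs k' hk' this]

-- if no column matches, no zip pair matches
theorem pv_zip_find_none (p : String → Bool) (cols row : List String)
    (h : cols.findIdx? p = none) :
    (cols.zip row).find? (fun cv => p cv.1) = none := by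
  rw [List.find?_eq_none]
  intro cv hcv
  have h1 : cv.1 ∈ cols := List.of_mem_zip hcv |>.1
  have := List.findIdx?_eq_none_iff.mp h cv.1 h1
  simp_all

-- once an index is recorded, the first-match search keeps it: columns.index of A's next() match is findIdx?
theorem pv_find_index (p : String → Bool) (cs : List String) (c : String)
    (h : cs.find? p = some c) : PySem.List.index? cs c = cs.findIdx? p := by
  induction cs with
  | nil => simp at h
  | cons x xs ih =>
    by_cases hp : p x = true
    · rw [List.find?_cons_of_pos hp] at h
      cases h
      rw [PySem.List.index?_cons_self]
      simp [List.findIdx?_cons, hp]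
    · rw [List.find?_cons_of_neg hp] at h
      have hpc : p c = true := List.find?_some h
      have hne : x ≠ c := by rintro rfl; exact hp hpc
      rw [PySem.List.index?_cons_of_ne xs hne, ih h]
      simp [List.findIdx?_cons, hp]

-- a column matched by a nonempty-substring test is nonempty
theorem pv_match_ne_empty (sub c : String) (hsub : sub.toList ≠ [])
    (h : PySem.Str.isIn sub (PySem.Str.lower c) = true) : c ≠ "" := by
  rintro rfl
  rw [PySem.Str.isIn_iff_infix] at h
  simp only [PySem.Str.toList_lower, PySem.Chars.lower] at h
  simp only [String.toList_empty, List.map_nil] at h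
  simp_all

-- dni[-4:] equals dni when len(dni) < 4
theorem pv_slice_short (s : String) (h : ¬ 4 ≤ PySem.Str.len s) :
    PySem.Str.slice s (some (-4)) none = s := by
  rw [← String.toList_inj, PySem.Str.toList_slice, PySem.Chars.slice_eq_listSlice,
    PySem.List.slice_from_neg_ofNat s.toList 4 (by omega)]
  have hlt : s.toList.length < 4 := by simpa [PySem.Str.len] using h
  have h0 : s.length - 4 = 0 := by
    have := @String.length_toList s; omega
  simp [h0]

-- one A-side lookup (next() + columns.index + row[...]) equals B's first zip match, under the
-- in-range hypothesis Pre_ provides for this component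
theorem pv_sides (p : String → Bool) (sub : String) (hsub : sub.toList ≠ [])
    (hp : ∀ c, p c = PySem.Str.isIn sub (PySem.Str.lower c))
    (row cs : List String)
    (hpre : ∀ k, cs.findIdx? p = some k → k < row.length) :
    (match cs.find? p with
      | none => ""
      | some c => if c = "" then "" else
          match PySem.List.index? cs c with
          | some i => PySem.List.pyGetD row (i : Int) ""
          | none => "")
    = (match (cs.zip row).find? (fun cv => p cv.1) with
       | some cv => cv.2 | none => "") := by
  cases hf : cs.find? p with
  | none =>
    have hfi : cs.findIdx? p = none := by
      rw [List.findIdx?_eq_none_iff]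
      intro x hx
      by_contra hb
      have := List.find?_eq_none.mp hf x hx
      simp_all
    rw [pv_zip_find_none p cs row hfi]
  | some c =>
    have hpc : p c = true := List.find?_some hf
    have hc : c ≠ "" := pv_match_ne_empty sub c hsub (by rw [← hp]; exact hpc)
    have hidx := pv_find_index p cs c hf
    cases hfi : cs.findIdx? p with
    | none =>
      exact absurd (List.findIdx?_eq_none_iff.mp hfi c (List.mem_of_find?_eq_some hf))
        (by simp [hpc])
    | some k =>
      rw [hfi] at hidx
      have hidx' : List.idxOf? c cs = some k := by
        rw [← PySem.List.index?_eq_idxOf?]; exact hidx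
      rw [pv_zip_find p cs row k hfi (hpre k hfi)]
      simp [hc, hidx']

-- ===== VERDICT (by name: the statement is the Claim_ definition above) =====
theorem obtener_codigo_personalizado_spec : Claim_equal_obtener_codigo_personalizado := by
  intro row columns _dom hpre
  unfold Spec_obtener_codigo_personalizado
  unfold Pre_obtener_codigo_personalizado at hpre
  simp only [Bool.and_eq_true, Option.all_eq_true] at hpre
  simp only [obtener_codigo_personalizado, obtener_codigo_personalizado_alt]
  rw [PySem.List.foldl_prod_mk
    (f := fun (a : String) (cv : String × String) =>
      if PySem.Str.isIn "apellidos" (PySem.Str.lower cv.1) then cv.2 else a)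
    (g := fun (a : String) (cv : String × String) =>
      if PySem.Str.isIn "dni" (PySem.Str.lower cv.1) then cv.2 else a)]
  rw [pv_rev_fold, pv_rev_fold]
  have hA := pv_sides (fun c => PySem.Str.isIn "apellidos" (PySem.Str.lower c)) "apellidos"
    (by decide) (fun _ => rfl) row columns
    (fun k hk => by have := hpre.1 k hk; simp_all)
  have hD := pv_sides (fun c => PySem.Str.isIn "dni" (PySem.Str.lower c)) "dni"
    (by decide) (fun _ => rfl) row columns
    (fun k hk => by have := hpre.2 k hk; simp_all)
  rw [hA, hD]
  set dni := (match (columns.zip row).find?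
        (fun cv => PySem.Str.isIn "dni" (PySem.Str.lower cv.1)) with
      | some cv => cv.2 | none => "") with hdni
  by_cases h4 : 4 ≤ PySem.Str.len dni
  · rw [if_pos h4]
  · rw [if_neg h4, pv_slice_short dni h4]
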